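-- pv_equiv track=rewrite | github.com/TarasFurman/chat_graph_back | app/usecases.py | _users_conections
-- ===== SOURCE A (Python) =====
-- def _users_conections(data, result=None):
--     len_data = len(data)
--     result_data = {}
--     if result:
--         result_data = result
--
--     for index, key in enumerate(data):
--         n = 0
--
--         while n < len_data:
--             res = [key]
--             if index == n:
--                 n += 1
--                 continue
--
--             res.append(data[n])
--             res.sort()
--
--             full_data = ''.join(str(x) for x in res)
--             if full_data not in result_data.keys():
--                 result_data[full_data] = {'source': res[0], 'target': res[1]}
--
--             n += 1
--     # '110': {'a': 1, 'b': 10}, '23': {'a': 2, 'b': 3},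
--     return result_data
-- ===== SOURCE B (Python) =====
-- def _users_conections(data, result=None):
--     result_data = result if result else {}
--     for i, a in enumerate(data):
--         for b in data[i + 1:]:
--             lo, hi = (a, b) if a <= b else (b, a)
--             key = str(lo) + str(hi)
--             if key not in result_data:
--                 result_data[key] = {'source': lo, 'target': hi}
--     return result_data
-- ===== Notes on version B (the rewrite author's own statement) =====
-- stated objective: alternative
-- what changed: B makes a single upper-triangle pass (each unordered pair once, via data[i+1:]) computing the key directly from min/max, instead of A's full nxn ordered-pair loop that builds, sorts and joins a fresh 2-element list for every ordered pair and re-checks already-present keys.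
import Mathlib
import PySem

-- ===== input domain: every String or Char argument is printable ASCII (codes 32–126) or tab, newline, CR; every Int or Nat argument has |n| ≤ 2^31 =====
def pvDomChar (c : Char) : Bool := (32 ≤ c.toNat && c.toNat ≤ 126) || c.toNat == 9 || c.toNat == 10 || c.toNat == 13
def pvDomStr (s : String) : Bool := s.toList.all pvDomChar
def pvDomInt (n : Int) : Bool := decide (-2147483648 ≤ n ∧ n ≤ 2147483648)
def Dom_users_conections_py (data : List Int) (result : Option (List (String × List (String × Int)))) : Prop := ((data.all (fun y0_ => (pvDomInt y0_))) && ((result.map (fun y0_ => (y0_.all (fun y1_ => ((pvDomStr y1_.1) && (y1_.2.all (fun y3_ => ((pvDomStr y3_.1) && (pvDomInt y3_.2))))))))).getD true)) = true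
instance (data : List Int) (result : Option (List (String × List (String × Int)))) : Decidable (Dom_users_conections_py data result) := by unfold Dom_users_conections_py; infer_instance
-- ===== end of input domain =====

-- B: one upper-triangle pass (each unordered pair once, via data[i+1:]) with a direct min/max key,
-- replacing A's full nxn ordered-pair loop that builds, sorts and joins a list per ordered pair.
-- When `result` is a truthy dict both Pythons mutate it in place; the equivalence proved here is
-- about the return value.

abbrev PvD := PySem.Dict String (List (String × Int))

-- ===== PORT A =====
-- the while loop `while n < len_data` with `n += 1` in both branches iterates n over range(len_data):
-- ported as a foldl over pyRange. data[n] is always in range (0 <= n < len(data)), so pyGetD's default 0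
-- is unreachable; likewise res always has exactly two elements, so pyGetD res {0,1} 0 is exact.
def users_conections_py (data : List Int) (result : Option (List (String × List (String × Int)))) : List (String × List (String × Int)) :=
  let len_data : Int := PySem.List.len data
  let result_data : PvD := match result with
    | some r => if r.isEmpty then PySem.Dict.empty else PySem.Dict.mk r
    | none => PySem.Dict.empty
  ((PySem.List.enumerate data).foldl (fun acc p =>
      (PySem.List.pyRange 0 len_data).foldl (fun acc2 n =>
        if p.1 == n then acc2
        else
          let res := PySem.List.sorted [p.2, PySem.List.pyGetD data n 0] (fun x => x) false
          let full_data := PySem.Str.join "" (res.map PySem.Int.toStr)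
          if (PySem.Dict.keys acc2).contains full_data then acc2
          else PySem.Dict.insert acc2 full_data
                 [("source", PySem.List.pyGetD res 0 0), ("target", PySem.List.pyGetD res 1 0)]) acc)
    result_data).items

-- ===== PORT B =====
-- literal body of Source B's inner loop; Python's `str(lo) + str(hi)` is ported as ''.join of the two parts
-- (PySem.Str.join "" [s, t] = s + t exactly)
def pvPairStep (a : Int) (acc : PvD) (b : Int) : PvD :=
  let lo := if a ≤ b then a else b
  let hi := if a ≤ b then b else a
  let key := PySem.Str.join "" [PySem.Int.toStr lo, PySem.Int.toStr hi]
  if PySem.Dict.contains acc key then acc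
  else PySem.Dict.insert acc key [("source", lo), ("target", hi)]

def users_conections_py_alt (data : List Int) (result : Option (List (String × List (String × Int)))) : List (String × List (String × Int)) :=
  let result_data : PvD := match result with
    | some r => if r.isEmpty then PySem.Dict.empty else PySem.Dict.mk r
    | none => PySem.Dict.empty
  ((PySem.List.enumerate data).foldl (fun acc p =>
      (PySem.List.slice data (some (p.1 + 1)) none).foldl (pvPairStep p.2) acc)
    result_data).items

-- ===== PRECONDITION & SPEC =====
def Spec_users_conections_py (data : List Int) (result : Option (List (String × List (String × Int)))) (out : List (String × List (String × Int))) : Prop := out = users_conections_py_alt data result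
instance (data : List Int) (result : Option (List (String × List (String × Int)))) (out : List (String × List (String × Int))) : Decidable (Spec_users_conections_py data result out) := by unfold Spec_users_conections_py; infer_instance

-- ===== CLAIM (what is proved, stated in full; the proofs are below) =====
def Claim_equal_users_conections_py : Prop := ∀ (data : List Int) (result : Option (List (String × List (String × Int)))), Dom_users_conections_py data result → Spec_users_conections_py data result (users_conections_py data result)

-- ===== LEMMAS AND PROOFS =====

-- the value both programs store for the unordered pair {a, b} (proof-side shorthand)
def pvVal (a b : Int) : List (String × Int) :=
  [("source", if a ≤ b then a else b), ("target", if a ≤ b then b else a)]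

-- the key both programs compute for the unordered pair {a, b}
def pvKey (a b : Int) : String :=
  PySem.Str.join "" [PySem.Int.toStr (if a ≤ b then a else b), PySem.Int.toStr (if a ≤ b then b else a)]

theorem pvKey_comm (a b : Int) : pvKey a b = pvKey b a := by
  unfold pvKey
  rcases lt_trichotomy a b with h | h | h
  · have h1 : a ≤ b := by omega
    have h2 : ¬ b ≤ a := by omega
    simp [h1, h2]
  · simp [h]
  · have h1 : b ≤ a := by omega
    have h2 : ¬ a ≤ b := by omega
    simp [h1, h2]

theorem pvSorted_pair (a b : Int) :
    PySem.List.sorted [a, b] (fun x => x) false = if a ≤ b then [a, b] else [b, a] := by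
  simp [PySem.List.sorted, PySem.List.insertBy]
  split_ifs with h1 h2 <;> try rfl
  all_goals omega

-- A's inner-loop body, once the skip branch is out of the way, is exactly pvPairStep
theorem pvBodyA_eq (a b : Int) (acc : PvD) :
    (let res := PySem.List.sorted [a, b] (fun x => x) false
     let full_data := PySem.Str.join "" (res.map PySem.Int.toStr)
     if (PySem.Dict.keys acc).contains full_data then acc
     else PySem.Dict.insert acc full_data
            [("source", PySem.List.pyGetD res 0 0), ("target", PySem.List.pyGetD res 1 0)])
    = pvPairStep a acc b := by
  unfold pvPairStep
  rw [pvSorted_pair]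
  by_cases h : a ≤ b <;>
    simp [h, List.map, PySem.List.pyGetD, PySem.List.pyGet?, PySem.List.pyIdx?,
          PySem.Str.join, PySem.Dict.contains_iff_mem_keys]

theorem pvPairStep_key (a b : Int) (acc : PvD) :
    pvPairStep a acc b
    = (if acc.contains (pvKey a b) then acc else acc.insert (pvKey a b) (pvVal a b)) := rfl

theorem pvPairStep_of_contains (a b : Int) (acc : PvD)
    (h : acc.contains (pvKey a b) = true) : pvPairStep a acc b = acc := by
  rw [pvPairStep_key, h]; rfl

theorem pvContains_pairStep_mono (a b : Int) (k : String) (acc : PvD)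
    (h : acc.contains k = true) : (pvPairStep a acc b).contains k = true := by
  rw [pvPairStep_key]
  split_ifs with h1
  · exact h
  · rw [PySem.Dict.contains_insert]; simp [h]

theorem pvContains_pairStep_self (a b : Int) (acc : PvD) :
    (pvPairStep a acc b).contains (pvKey a b) = true := by
  rw [pvPairStep_key]
  split_ifs with h
  · exact h
  · exact PySem.Dict.contains_insert_self _ _ _

theorem pvContains_foldl_mono (a : Int) (l : List Int) (k : String) (acc : PvD)
    (h : acc.contains k = true) : (l.foldl (pvPairStep a) acc).contains k = true := by
  induction l generalizing acc with
  | nil => exact h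
  | cons b t ih => exact ih _ (pvContains_pairStep_mono a b k acc h)

theorem pvContains_foldl_self (a : Int) (l : List Int) (c : Int) (acc : PvD)
    (hc : c ∈ l) : (l.foldl (pvPairStep a) acc).contains (pvKey a c) = true := by
  induction l generalizing acc with
  | nil => cases hc
  | cons b t ih =>
    rcases List.mem_cons.mp hc with rfl | hmem
    · exact pvContains_foldl_mono a t _ _ (pvContains_pairStep_self a c acc)
    · exact ih _ hmem

-- the prefix part of A's row is a no-op: every key there is already present
theorem pvSkipPre (pre : List Int) (s i a : Int) (acc : PvD)
    (hpre : ∀ b ∈ pre, acc.contains (pvKey a b) = true) (hi : s + pre.length ≤ i) :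
    (PySem.List.enumerate pre s).foldl
        (fun acc2 q => if i == q.1 then acc2 else pvPairStep a acc2 q.2) acc = acc := by
  induction pre generalizing s acc with
  | nil => rfl
  | cons b t ih =>
    rw [PySem.List.enumerate_cons]
    simp only [List.foldl_cons]
    have hne : (i == s) = false := by
      simp only [List.length_cons] at hi
      simp; omega
    rw [hne]
    simp only [Bool.false_eq_true, if_false]
    rw [pvPairStep_of_contains a b acc (hpre b (List.mem_cons_self))]
    exact ih (s + 1) acc (fun x hx => hpre x (List.mem_cons_of_mem _ hx))
      (by simp only [List.length_cons] at hi; omega)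

-- past the diagonal the skip branch never fires
theorem pvNoSkip (post : List Int) (s i a : Int) (acc : PvD) (hi : i < s) :
    (PySem.List.enumerate post s).foldl
        (fun acc2 q => if i == q.1 then acc2 else pvPairStep a acc2 q.2) acc
    = post.foldl (pvPairStep a) acc := by
  induction post generalizing s acc with
  | nil => rfl
  | cons b t ih =>
    rw [PySem.List.enumerate_cons]
    simp only [List.foldl_cons]
    have hne : (i == s) = false := by simp; omega
    rw [hne]
    simp only [Bool.false_eq_true, if_false]
    exact ih (s + 1) _ (by omega)

-- A's whole row at index pre.length equals B's row: fold pvPairStep over the strict suffix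
theorem pvRowA (pre post : List Int) (a : Int) (acc : PvD)
    (hpre : ∀ b ∈ pre, acc.contains (pvKey a b) = true) :
    (PySem.List.enumerate (pre ++ a :: post)).foldl
        (fun acc2 q => if (pre.length : Int) == q.1 then acc2 else pvPairStep a acc2 q.2) acc
    = post.foldl (pvPairStep a) acc := by
  rw [PySem.List.enumerate_append, List.foldl_append]
  rw [pvSkipPre pre 0 (pre.length) a acc hpre (by omega)]
  rw [PySem.List.enumerate_cons]
  simp only [List.foldl_cons, zero_add, beq_self_eq_true, if_true]
  exact pvNoSkip post _ _ a acc (by omega)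

theorem pvMain (post pre : List Int) (acc : PvD)
    (hinv : ∀ b ∈ pre, ∀ c ∈ post, acc.contains (pvKey b c) = true) :
    (PySem.List.enumerate post (pre.length : Int)).foldl
        (fun acc p => (PySem.List.enumerate (pre ++ post)).foldl
            (fun acc2 q => if p.1 == q.1 then acc2 else pvPairStep p.2 acc2 q.2) acc) acc
    = (PySem.List.enumerate post (pre.length : Int)).foldl
        (fun acc p => (PySem.List.slice (pre ++ post) (some (p.1 + 1)) none).foldl (pvPairStep p.2) acc) acc := by
  induction post generalizing pre acc with
  | nil => rfl
  | cons a t ih =>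
    rw [PySem.List.enumerate_cons, List.foldl_cons, List.foldl_cons]
    have hdrop : (pre ++ a :: t).drop (pre.length + 1) = t := by
      have : pre ++ a :: t = (pre ++ [a]) ++ t := by simp
      rw [this]
      have hl : pre.length + 1 = (pre ++ [a]).length := by simp
      rw [hl, List.drop_left]
    have hslice : PySem.List.slice (pre ++ a :: t) (some ((pre.length : Int) + 1)) none = t := by
      have h1 : ((pre.length : Int) + 1) = ((pre.length + 1 : Nat) : Int) := by push_cast; ring
      rw [h1, PySem.List.slice_from_natCast, hdrop]
    have hrow := pvRowA pre t a acc
      (fun b hb => by rw [pvKey_comm]; exact hinv b hb a (List.mem_cons_self))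
    rw [hrow, hslice]
    have hpre1 : ((pre.length : Int) + 1) = (((pre ++ [a]).length : Nat) : Int) := by
      simp
    have hdata : pre ++ a :: t = (pre ++ [a]) ++ t := by simp
    rw [hpre1, hdata]
    exact ih (pre ++ [a]) (t.foldl (pvPairStep a) acc) (by
      intro b hb c hc
      rcases List.mem_append.mp hb with hb' | hb'
      · exact pvContains_foldl_mono a t _ _ (hinv b hb' c (List.mem_cons_of_mem _ hc))
      · rw [List.mem_singleton] at hb'
        subst hb'
        exact pvContains_foldl_self b t c acc hc)

theorem pvMain0 (data : List Int) (acc : PvD) :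
    (PySem.List.enumerate data).foldl
        (fun acc p => (PySem.List.enumerate data).foldl
            (fun acc2 q => if p.1 == q.1 then acc2 else pvPairStep p.2 acc2 q.2) acc) acc
    = (PySem.List.enumerate data).foldl
        (fun acc p => (PySem.List.slice data (some (p.1 + 1)) none).foldl (pvPairStep p.2) acc) acc := by
  have h := pvMain data [] acc (by intro b hb; cases hb)
  simpa only [List.nil_append, List.length_nil, Nat.cast_zero] using h

-- ===== VERDICT (by name: the statement is the Claim_ definition above) =====
theorem users_conections_py_spec : Claim_equal_users_conections_py := by
  intro data result _
  unfold Spec_users_conections_py users_conections_py users_conections_py_alt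
  simp only []
  congr 1
  -- rewrite A's inner pyRange fold into an enumerate fold, then apply pvMain with pre = []
  have hinner : ∀ (p : Int × Int) (acc : PvD),
      (PySem.List.pyRange 0 (PySem.List.len data)).foldl (fun acc2 n =>
        if p.1 == n then acc2
        else
          let res := PySem.List.sorted [p.2, PySem.List.pyGetD data n 0] (fun x => x) false
          let full_data := PySem.Str.join "" (res.map PySem.Int.toStr)
          if (PySem.Dict.keys acc2).contains full_data then acc2
          else PySem.Dict.insert acc2 full_data
                 [("source", PySem.List.pyGetD res 0 0), ("target", PySem.List.pyGetD res 1 0)]) acc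
      = (PySem.List.enumerate data).foldl
          (fun acc2 q => if p.1 == q.1 then acc2 else pvPairStep p.2 acc2 q.2) acc := by
    intro p acc
    rw [PySem.List.enumerate_eq_map_pyRange data 0, List.foldl_map]
    congr 1
    funext acc2 n
    by_cases h : p.1 == n
    · simp [h]
    · simp only [h, Bool.false_eq_true, if_false]
      exact pvBodyA_eq p.2 (PySem.List.pyGetD data n 0) acc2
  have houter :
      (fun (acc : PvD) (p : Int × Int) =>
        (PySem.List.pyRange 0 (PySem.List.len data)).foldl (fun acc2 n =>
          if p.1 == n then acc2
          else
            let res := PySem.List.sorted [p.2, PySem.List.pyGetD data n 0] (fun x => x) false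
            let full_data := PySem.Str.join "" (res.map PySem.Int.toStr)
            if (PySem.Dict.keys acc2).contains full_data then acc2
            else PySem.Dict.insert acc2 full_data
                   [("source", PySem.List.pyGetD res 0 0), ("target", PySem.List.pyGetD res 1 0)]) acc)
      = (fun (acc : PvD) (p : Int × Int) =>
          (PySem.List.enumerate data).foldl
            (fun acc2 q => if p.1 == q.1 then acc2 else pvPairStep p.2 acc2 q.2) acc) := by
    funext acc p; exact hinner p acc
  rw [houter]
  exact pvMain0 data _
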